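-- pv_equiv track=rewrite | github.com/studyingegret/stde.pegen | src/pegen/parser_v2.py | _count_nlines_and_last_col
-- ===== SOURCE A (Python) =====
-- from typing import (TYPE_CHECKING, Any, Callable, ClassVar, Dict, Final, Generic, List, Literal, NamedTuple, Never, Optional,
--                     Self, TextIO, Tuple, Type, TypeAlias, TypeVar, Union, cast, Protocol, overload)
--
-- def _count_nlines_and_last_col(s: str) -> Tuple[int, int]:
--     """Second return item is always 0 when first return item is 0"""
--     length = len(s)
--     i = 0
--     nlines = 0
--     last_line_start = 0
--     while i < length:
--         if s[i] == "\n":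
--             i += 1
--             nlines += 1
--             last_line_start = i
--         elif s[i] == "\r":
--             i += 1
--             if i < length and s[i] == "\n":
--                 i += 1
--             nlines += 1
--             last_line_start = i
--         else:
--             i += 1
--     # If Line 1 starts at a, Line 2 starts at b, then length of Line 1 is b - a
--     return (0, 0) if nlines == 0 else (nlines, length - last_line_start)
-- ===== SOURCE B (Python) =====
-- import re
--
-- _LINE_BREAK = re.compile(r"\r\n|\n|\r")
--
-- def _count_nlines_and_last_col(s):
--     breaks = list(_LINE_BREAK.finditer(s))
--     if not breaks:
--         return (0, 0)
--     return (len(breaks), len(s) - breaks[-1].end())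
-- ===== Notes on version B (the rewrite author's own statement) =====
-- stated objective: idiomatic
-- what changed: Replaces A's index-driven while loop with mutable counters (nlines, last_line_start) by a single regex scan collecting all line-break matches (\r\n|\n|\r) and deriving the pair from the match list's length and last end position.
import Mathlib
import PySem

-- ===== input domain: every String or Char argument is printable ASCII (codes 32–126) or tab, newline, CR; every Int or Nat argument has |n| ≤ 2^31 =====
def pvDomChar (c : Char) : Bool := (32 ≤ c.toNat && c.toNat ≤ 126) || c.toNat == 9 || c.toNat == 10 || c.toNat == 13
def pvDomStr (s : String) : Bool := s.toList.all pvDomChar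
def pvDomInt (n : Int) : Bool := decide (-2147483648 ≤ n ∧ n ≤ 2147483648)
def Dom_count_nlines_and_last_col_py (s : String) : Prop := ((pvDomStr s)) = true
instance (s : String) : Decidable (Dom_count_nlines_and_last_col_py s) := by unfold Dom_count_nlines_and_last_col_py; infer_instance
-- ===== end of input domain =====

-- B replaces A's index-driven while loop with mutable counters (nlines, last_line_start)
-- by one regex-style scan collecting the list of break end positions, then a closed form (idiomatic).

-- ===== PORT A =====
-- A's while loop as structural recursion on the remaining characters: the same decision
-- tree ('\n' first, then '\r' with a one-character lookahead), accumulators i, nlines,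
-- last_line_start threaded through.
def pvALoop : List Char → Int → Int → Int → Int × Int
  | [], _, nlines, lastLineStart => (nlines, lastLineStart)
  | '\n' :: rest, i, nlines, _ => pvALoop rest (i + 1) (nlines + 1) (i + 1)
  | '\r' :: '\n' :: rest, i, nlines, _ => pvALoop rest (i + 2) (nlines + 1) (i + 2)
  | '\r' :: rest, i, nlines, _ => pvALoop rest (i + 1) (nlines + 1) (i + 1)
  | _ :: rest, i, nlines, lastLineStart => pvALoop rest (i + 1) nlines lastLineStart

def count_nlines_and_last_col_py (s : String) : Int × Int :=
  let l := s.toList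
  let length : Int := l.length
  let r := pvALoop l 0 0 0
  if r.1 = 0 then (0, 0) else (r.1, length - r.2)

-- ===== PORT B =====
-- B's re.finditer(r"\r\n|\n|\r"): leftmost-first scan, alternation order "\r\n" | "\n" | "\r";
-- we collect each match's end position (match.end()) into a list.
def pvBreakEnds : List Char → Int → List Int
  | [], _ => []
  | '\r' :: '\n' :: rest, i => (i + 2) :: pvBreakEnds rest (i + 2)
  | '\n' :: rest, i => (i + 1) :: pvBreakEnds rest (i + 1)
  | '\r' :: rest, i => (i + 1) :: pvBreakEnds rest (i + 1)
  | _ :: rest, i => pvBreakEnds rest (i + 1)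

def count_nlines_and_last_col_py_alt (s : String) : Int × Int :=
  let ends := pvBreakEnds s.toList 0
  match ends.getLast? with
  | none => (0, 0)
  | some e => ((ends.length : Int), (s.toList.length : Int) - e)

-- ===== PRECONDITION & SPEC =====
def Spec_count_nlines_and_last_col_py (s : String) (out : Int × Int) : Prop := out = count_nlines_and_last_col_py_alt s
instance (s : String) (out : Int × Int) : Decidable (Spec_count_nlines_and_last_col_py s out) := by unfold Spec_count_nlines_and_last_col_py; infer_instance

-- ===== CLAIM (what is proved, stated in full; the proofs are below) =====
def Claim_equal_count_nlines_and_last_col_py : Prop := ∀ (s : String), Dom_count_nlines_and_last_col_py s → Spec_count_nlines_and_last_col_py s (count_nlines_and_last_col_py s)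

-- ===== LEMMAS AND PROOFS =====

-- A's loop result expressed through B's list of break-end positions.
theorem pvALoop_eq (m : Nat) : ∀ (l : List Char), l.length ≤ m → ∀ (i nlines lls : Int),
    pvALoop l i nlines lls =
      (nlines + ((pvBreakEnds l i).length : Int),
       (pvBreakEnds l i).getLastD lls) := by
  induction m with
  | zero =>
    intro l hl i n lls
    rw [List.length_eq_zero_iff.mp (Nat.le_zero.mp hl)]
    simp [pvALoop, pvBreakEnds]
  | succ m ih =>
    intro l hl i n lls
    match l with
    | [] => simp [pvALoop, pvBreakEnds]
    | c :: rest =>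
      simp only [List.length_cons, Nat.succ_le_succ_iff] at hl
      by_cases hn : c = '\n'
      · subst hn
        have eA : pvALoop ('\n' :: rest) i n lls = pvALoop rest (i + 1) (n + 1) (i + 1) := rfl
        have eB : pvBreakEnds ('\n' :: rest) i = (i + 1) :: pvBreakEnds rest (i + 1) := rfl
        rw [eA, eB, ih rest hl, List.getLastD_cons, List.length_cons, Prod.mk.injEq]
        exact ⟨by push_cast; ring, rfl⟩
      · by_cases hr : c = '\r'
        · subst hr
          cases rest with
          | nil =>
            have eA : pvALoop ['\r'] i n lls = pvALoop [] (i + 1) (n + 1) (i + 1) := rfl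
            have eB : pvBreakEnds ['\r'] i = (i + 1) :: pvBreakEnds [] (i + 1) := rfl
            rw [eA, eB, ih [] (by simp), List.getLastD_cons, List.length_cons, Prod.mk.injEq]
            exact ⟨by push_cast; ring, rfl⟩
          | cons d rest2 =>
            by_cases hd : d = '\n'
            · subst hd
              have h2 : rest2.length ≤ m := by simp at hl; omega
              have eA : pvALoop ('\r' :: '\n' :: rest2) i n lls
                  = pvALoop rest2 (i + 2) (n + 1) (i + 2) := rfl
              have eB : pvBreakEnds ('\r' :: '\n' :: rest2) i
                  = (i + 2) :: pvBreakEnds rest2 (i + 2) := rfl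
              rw [eA, eB, ih rest2 h2, List.getLastD_cons, List.length_cons, Prod.mk.injEq]
              exact ⟨by push_cast; ring, rfl⟩
            · have eA : pvALoop ('\r' :: d :: rest2) i n lls
                  = pvALoop (d :: rest2) (i + 1) (n + 1) (i + 1) := by
                simp [pvALoop, hd]
              have eB : pvBreakEnds ('\r' :: d :: rest2) i
                  = (i + 1) :: pvBreakEnds (d :: rest2) (i + 1) := by
                simp [pvBreakEnds, hd]
              rw [eA, eB, ih (d :: rest2) hl, List.getLastD_cons, List.length_cons, Prod.mk.injEq]
              exact ⟨by push_cast; ring, rfl⟩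
        · have eA : pvALoop (c :: rest) i n lls = pvALoop rest (i + 1) n lls := by
            simp [pvALoop, hr]
          have eB : pvBreakEnds (c :: rest) i = pvBreakEnds rest (i + 1) := by
            simp [pvBreakEnds, hr]
          rw [eA, eB, ih rest hl]

-- ===== VERDICT (by name: the statement is the Claim_ definition above) =====
theorem count_nlines_and_last_col_py_spec : Claim_equal_count_nlines_and_last_col_py := by
  intro s _
  unfold Spec_count_nlines_and_last_col_py count_nlines_and_last_col_py count_nlines_and_last_col_py_alt
  dsimp only
  rw [pvALoop_eq s.toList.length s.toList le_rfl 0 0 0]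
  cases h : (pvBreakEnds s.toList 0).getLast? with
  | none =>
    have : pvBreakEnds s.toList 0 = [] := List.getLast?_eq_none_iff.mp h
    simp [this]
  | some e =>
    have hne : pvBreakEnds s.toList 0 ≠ [] := by
      intro h0; rw [h0] at h; simp at h
    have hlen : ¬ ((0 : Int) + ((pvBreakEnds s.toList 0).length : Int) = 0) := by
      simpa [List.length_eq_zero_iff] using hne
    rw [if_neg hlen]
    simp [List.getLastD_eq_getLast?, h]
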